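-- pv_equiv track=rewrite | github.com/ellemac123/adventofcode | 2019/day_one/tyrannyOfTheRocketEquation.py | find_mass
-- ===== SOURCE A (Python) =====
-- import math
--
-- def find_mass(inputlist):
--     """
--     Given a list of numbers, calculate the fuel required by
--     dividing its value by three, rounding down, and
--     then subtracting 2
--     """
--     total = 0
--     part_two_total = 0
--
--     for i in inputlist:
--         value = (math.floor(i/3) - 2)
--         total += value
--
--         while value > 0:
--             part_two_total += value
--             value = (math.floor(value/3) - 2)
--
--     return total, part_two_total
-- ===== SOURCE B (Python) =====
-- import math
--
-- def fuel(v):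
--     return 0 if v <= 0 else v + fuel(math.floor(v/3) - 2)
--
-- def find_mass(inputlist):
--     total = sum(math.floor(i/3) - 2 for i in inputlist)
--     part_two_total = sum(fuel(math.floor(i/3) - 2) for i in inputlist)
--     return total, part_two_total
-- ===== Notes on version B (the rewrite author's own statement) =====
-- stated objective: simpler
-- what changed: Replaces the single loop with an inner while accumulator by two direct sums over the list, using a recursive fuel(v) helper for the positive fuel chain of part two.
import Mathlib
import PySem

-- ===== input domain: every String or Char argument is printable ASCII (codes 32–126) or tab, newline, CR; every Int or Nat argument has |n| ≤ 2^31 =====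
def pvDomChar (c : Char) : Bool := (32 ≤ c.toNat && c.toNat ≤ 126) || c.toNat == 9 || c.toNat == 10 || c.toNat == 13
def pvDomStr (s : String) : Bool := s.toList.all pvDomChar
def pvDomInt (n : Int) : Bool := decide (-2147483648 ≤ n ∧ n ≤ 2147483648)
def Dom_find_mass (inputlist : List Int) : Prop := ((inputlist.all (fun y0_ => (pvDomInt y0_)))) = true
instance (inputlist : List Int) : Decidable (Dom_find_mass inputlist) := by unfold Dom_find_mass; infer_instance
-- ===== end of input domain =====

-- B computes the same two totals by two direct sums with a recursive fuel helper, instead of A's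
-- single loop carrying both accumulators through an inner while loop (objective: simpler).

-- termination fact used by both ports' recursions
theorem pvFuelStep_lt (v : Int) (h : 0 < v) : (PySem.Int.floordiv v 3 - 2).toNat < v.toNat := by
  rw [PySem.Int.floordiv_eq_ediv_of_pos (by norm_num : (0:Int) < 3)]
  omega

-- ===== PORT A =====
-- inner 'while value > 0' loop of A, state = (part_two_total, value)
def pvLoopA (pt v : Int) : Int :=
  if v > 0 then pvLoopA (pt + v) (PySem.Int.floordiv v 3 - 2) else pt
termination_by v.toNat
decreasing_by exact pvFuelStep_lt v (by omega)

def find_mass (inputlist : List Int) : Int × Int :=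
  inputlist.foldl
    (fun (acc : Int × Int) i =>
      let value := PySem.Int.floordiv i 3 - 2
      (acc.1 + value, pvLoopA acc.2 value))
    (0, 0)

-- ===== PORT B =====
def pvFuel (v : Int) : Int :=
  if v ≤ 0 then 0 else v + pvFuel (PySem.Int.floordiv v 3 - 2)
termination_by v.toNat
decreasing_by exact pvFuelStep_lt v (by omega)

def find_mass_alt (inputlist : List Int) : Int × Int :=
  ((inputlist.map (fun i => PySem.Int.floordiv i 3 - 2)).sum,
   (inputlist.map (fun i => pvFuel (PySem.Int.floordiv i 3 - 2))).sum)

-- ===== PRECONDITION & SPEC =====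
def Spec_find_mass (inputlist : List Int) (out : Int × Int) : Prop := out = find_mass_alt inputlist
instance (inputlist : List Int) (out : Int × Int) : Decidable (Spec_find_mass inputlist out) := by unfold Spec_find_mass; infer_instance

-- ===== CLAIM (what is proved, stated in full; the proofs are below) =====
def Claim_equal_find_mass : Prop := ∀ (inputlist : List Int), Dom_find_mass inputlist → Spec_find_mass inputlist (find_mass inputlist)

-- ===== LEMMAS AND PROOFS =====

theorem pvLoopA_eq_fuel (pt v : Int) : pvLoopA pt v = pt + pvFuel v := by
  rw [pvLoopA, pvFuel]
  by_cases h : v > 0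
  · rw [if_pos h, if_neg (by omega : ¬ v ≤ 0),
      pvLoopA_eq_fuel (pt + v) (PySem.Int.floordiv v 3 - 2)]
    ring
  · rw [if_neg h, if_pos (by omega : v ≤ 0)]
    ring
termination_by v.toNat
decreasing_by exact pvFuelStep_lt v (by omega)

theorem pvFold_eq (l : List Int) : ∀ t p : Int,
    l.foldl
      (fun (acc : Int × Int) i =>
        let value := PySem.Int.floordiv i 3 - 2
        (acc.1 + value, pvLoopA acc.2 value))
      (t, p)
    = (t + (l.map (fun i => PySem.Int.floordiv i 3 - 2)).sum,
       p + (l.map (fun i => pvFuel (PySem.Int.floordiv i 3 - 2))).sum) := by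
  induction l with
  | nil => intro t p; simp
  | cons x xs ih =>
    intro t p
    simp only [List.foldl_cons, List.map_cons, List.sum_cons]
    rw [ih, pvLoopA_eq_fuel]
    rw [Prod.mk.injEq]
    constructor <;> ring

-- ===== VERDICT (by name: the statement is the Claim_ definition above) =====
theorem find_mass_spec : Claim_equal_find_mass := by
  intro l _
  unfold Spec_find_mass find_mass find_mass_alt
  rw [pvFold_eq l 0 0]
  simp
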